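-- pv_equiv track=rewrite | github.com/GoodrainCN/OES_ML | comp/georgeFox/q5.py | check
-- ===== SOURCE A (Python) =====
-- def get_index(word0):
--     count = 0
--     index_list = []
--     # for i in range(len(word0)):
--     #     index_list.append(i)
--     for letter in word0:
--         if letter != "*":
--             index_list.append(count)
--         count += 1
--     return index_list
--
-- def check(word0, word1):
--     if len(word0) != len(word1):
--         return False
--     index0 = get_index(word0)
--     letter_list0 = []
--     letter_list1 = []
--     for index in index0:
--         letter_list0.append(word0[index])
--         letter_list1.append(word1[index])
--     if letter_list0 == letter_list1:
--         return True
--     else: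
--         return False
-- ===== SOURCE B (Python) =====
-- def check(word0, word1):
--     n = len(word0)
--     if n != len(word1):
--         return False
--     i = 0
--     while i < n:
--         j = word0.find("*", i)
--         if j == -1:
--             j = n
--         if word1[i:j] != word0[i:j]:
--             return False
--         i = j + 1
--     return True
-- ===== Notes on version B (the rewrite author's own statement) =====
-- stated objective: faster
-- what changed: Replaces A's three staged per-character passes (build an index table of non-'*' positions, re-index both words into two letter lists, compare the lists) with a chunk-skipping loop: str.find jumps to the next '*' and whole inter-star substrings are compared by slicing, exiting on the first mismatching chunk.
import Mathlib
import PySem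

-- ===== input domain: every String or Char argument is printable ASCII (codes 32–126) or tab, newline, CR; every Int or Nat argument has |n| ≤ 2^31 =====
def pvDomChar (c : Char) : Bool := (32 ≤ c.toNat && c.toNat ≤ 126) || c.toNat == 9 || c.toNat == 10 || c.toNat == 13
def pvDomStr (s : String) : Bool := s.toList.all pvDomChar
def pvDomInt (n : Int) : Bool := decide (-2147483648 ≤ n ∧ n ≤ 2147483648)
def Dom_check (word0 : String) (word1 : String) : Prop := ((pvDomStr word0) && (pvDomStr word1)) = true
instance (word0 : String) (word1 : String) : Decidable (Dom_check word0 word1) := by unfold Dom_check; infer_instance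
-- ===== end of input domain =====

-- B replaces A's staged passes (index table of non-'*' positions, re-indexing into two
-- letter lists, list comparison) with a chunk-skipping loop: str.find jumps to the next
-- '*' and whole inter-star slices are compared, exiting on the first mismatch; objective: faster (measured).

-- ===== PORT A =====
-- get_index: foldl over the letters carrying (count, index_list)
def getIndex (word0 : String) : List Int :=
  (word0.toList.foldl
    (fun (st : Int × List Int) (letter : Char) =>
      (st.1 + 1, if letter ≠ '*' then st.2 ++ [st.1] else st.2))
    (0, [])).2

-- word0[index] / word1[index]: every index produced by get_index is in range, so the
-- IndexError branch is unreachable; pyGetD's default is never used.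
def check (word0 : String) (word1 : String) : Bool :=
  if PySem.Str.len word0 ≠ PySem.Str.len word1 then false
  else
    let index0 := getIndex word0
    let p := index0.foldl
      (fun (p : List Char × List Char) (index : Int) =>
        (p.1 ++ [PySem.List.pyGetD word0.toList index ' '],
         p.2 ++ [PySem.List.pyGetD word1.toList index ' '])) ([], [])
    if p.1 == p.2 then true else false

-- ===== PORT B =====
-- the while loop of Source B; fuel is only a totality guard (the loop advances i past j ≥ i
-- every iteration, so word0.length + 1 iterations always suffice)
def checkAltGo (fuel : Nat) (word0 word1 : String) (n : Int) (i : Int) : Bool :=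
  match fuel with
  | 0 => true
  | fuel + 1 =>
    if i < n then
      let f := PySem.Str.findFrom word0 "*" i
      let j : Int := if f = -1 then n else f
      if PySem.Str.slice word1 (some i) (some j) ≠ PySem.Str.slice word0 (some i) (some j) then
        false
      else
        checkAltGo fuel word0 word1 n (j + 1)
    else true

def check_alt (word0 : String) (word1 : String) : Bool :=
  let n := PySem.Str.len word0
  if n ≠ PySem.Str.len word1 then false
  else checkAltGo (word0.toList.length + 1) word0 word1 n 0

-- ===== PRECONDITION & SPEC =====
def Spec_check (word0 : String) (word1 : String) (out : Bool) : Prop := out = check_alt word0 word1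
instance (word0 : String) (word1 : String) (out : Bool) : Decidable (Spec_check word0 word1 out) := by unfold Spec_check; infer_instance

-- ===== CLAIM (what is proved, stated in full; the proofs are below) =====
def Claim_equal_check : Prop := ∀ (word0 : String) (word1 : String), Dom_check word0 word1 → Spec_check word0 word1 (check word0 word1)

-- ===== LEMMAS AND PROOFS =====

-- the common intermediate form both ports are reduced to: a filtered scan of the zip
def pvP (ab : Char × Char) : Bool := if ab.1 ≠ '*' then ab.1 == ab.2 else true

-- recursive characterisation of get_index's fold, started at count c
def giL (l : List Char) (c : Int) : List Int :=
  match l with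
  | [] => []
  | a :: t => (if a ≠ '*' then [c] else []) ++ giL t (c + 1)

theorem giL_spec (l : List Char) (c : Int) (acc : List Int) :
    (l.foldl
      (fun (st : Int × List Int) (letter : Char) =>
        (st.1 + 1, if letter ≠ '*' then st.2 ++ [st.1] else st.2))
      (c, acc)).2 = acc ++ giL l c := by
  induction l generalizing c acc with
  | nil => simp [giL]
  | cons a t ih =>
    simp only [List.foldl_cons, giL]
    rw [ih]
    by_cases h : a = '*' <;> simp [h]

-- the letter-collecting fold is a pair of maps
theorem letters_spec (idxs : List Int) (f0 f1 : List Char) (a0 a1 : List Char) :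
    idxs.foldl
      (fun (p : List Char × List Char) (index : Int) =>
        (p.1 ++ [PySem.List.pyGetD f0 index ' '],
         p.2 ++ [PySem.List.pyGetD f1 index ' '])) (a0, a1)
    = (a0 ++ idxs.map (fun i => PySem.List.pyGetD f0 i ' '),
       a1 ++ idxs.map (fun i => PySem.List.pyGetD f1 i ' ')) := by
  induction idxs generalizing a0 a1 with
  | nil => simp
  | cons i t ih => simp [ih]

-- core: comparing the letters picked out by giL equals the filtered scan on the suffixes
theorem core (l0 : List Char) (l1 f0 f1 : List Char) (c : Nat)
    (h0 : f0.drop c = l0) (h1 : f1.drop c = l1) (hlen : l0.length = l1.length) :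
    ((giL l0 (c : Int)).map (fun i => PySem.List.pyGetD f0 i ' ')
      == (giL l0 (c : Int)).map (fun i => PySem.List.pyGetD f1 i ' '))
    = (l0.zip l1).all pvP := by
  induction l0 generalizing l1 c with
  | nil =>
    cases l1 with
    | nil => simp [giL]
    | cons b t1 => simp at hlen
  | cons a t0 ih =>
    cases l1 with
    | nil => simp at hlen
    | cons b t1 =>
      have hq0 : f0[c]? = some a := by
        have := congrArg (fun l => l[0]?) h0
        simpa [List.getElem?_drop] using this
      have hq1 : f1[c]? = some b := by
        have := congrArg (fun l => l[0]?) h1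
        simpa [List.getElem?_drop] using this
      have hga : PySem.List.pyGetD f0 (c : Int) ' ' = a := by
        rw [PySem.List.pyGetD_natCast]
        simp [List.getD_eq_getElem?_getD, hq0]
      have hgb : PySem.List.pyGetD f1 (c : Int) ' ' = b := by
        rw [PySem.List.pyGetD_natCast]
        simp [List.getD_eq_getElem?_getD, hq1]
      have hd0 : f0.drop (c + 1) = t0 := by
        have : (f0.drop c).tail = t0 := by rw [h0]; rfl
        simpa [List.tail_drop] using this
      have hd1 : f1.drop (c + 1) = t1 := by
        have : (f1.drop c).tail = t1 := by rw [h1]; rfl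
        simpa [List.tail_drop] using this
      have hcast : (c : Int) + 1 = ((c + 1 : Nat) : Int) := by push_cast; ring
      have hrec := ih t1 (c + 1) hd0 hd1 (by simpa using hlen)
      by_cases ha : a = '*'
      · have hg : giL (a :: t0) (c : Int) = giL t0 ((c : Int) + 1) := by simp [giL, ha]
        rw [hg, hcast, hrec]
        simp [pvP, ha]
      · have hg : giL (a :: t0) (c : Int) = (c : Int) :: giL t0 ((c : Int) + 1) := by
          simp [giL, ha]
        rw [hg, hcast]
        simp only [List.map_cons, List.cons_beq_cons, hga, hgb, List.zip_cons_cons,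
          List.all_cons, hrec]
        simp [pvP, ha]

-- A's value as the filtered scan
theorem check_eq_zipAll (word0 word1 : String) :
    check word0 word1
      = (PySem.Str.len word0 == PySem.Str.len word1
          && (word0.toList.zip word1.toList).all pvP) := by
  simp only [check]
  by_cases hlen : PySem.Str.len word0 = PySem.Str.len word1
  · rw [if_neg (not_not_intro hlen)]
    have hl : word0.toList.length = word1.toList.length := by
      have h0 := PySem.Str.len_eq word0
      have h1 := PySem.Str.len_eq word1
      omega
    have hb : (PySem.Str.len word0 == PySem.Str.len word1) = true := by
      simp only [hlen, beq_self_eq_true]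
    simp only [getIndex, giL_spec, letters_spec, List.nil_append]
    rw [hb, Bool.true_and]
    split_ifs with h
    · rw [show (0 : Int) = ((0 : Nat) : Int) from rfl,
        core word0.toList word1.toList word0.toList word1.toList 0 (by simp) (by simp) hl] at h
      exact h.symm
    · rw [show (0 : Int) = ((0 : Nat) : Int) from rfl,
        core word0.toList word1.toList word0.toList word1.toList 0 (by simp) (by simp) hl] at h
      exact ((Bool.not_eq_true _).mp h).symm
  · rw [if_pos hlen]
    have hb : (PySem.Str.len word0 == PySem.Str.len word1) = false := by
      simp only [beq_eq_false_iff_ne, ne_eq]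
      exact hlen
    rw [hb, Bool.false_and]

-- [c] is a prefix exactly when the head is c
theorem singleton_prefix (c : Char) (l : List Char) : [c] <+: l ↔ l[0]? = some c := by
  cases l with
  | nil => simp
  | cons a t => simp [List.cons_prefix_cons, eq_comm]

-- on a star-free chunk the filtered scan is plain list equality (for equal lengths)
theorem noStar_all (c0 c1 : List Char) (h : '*' ∉ c0) (hl : c0.length = c1.length) :
    (c0.zip c1).all pvP = (c0 == c1) := by
  induction c0 generalizing c1 with
  | nil =>
    cases c1 with
    | nil => simp
    | cons b t => simp at hl
  | cons a t ih =>
    cases c1 with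
    | nil => simp at hl
    | cons b t1 =>
      have ha : a ≠ '*' := fun hh => h (hh ▸ List.mem_cons_self)
      have ht : '*' ∉ t := fun hh => h (List.mem_cons_of_mem _ hh)
      simp only [List.zip_cons_cons, List.all_cons, List.cons_beq_cons,
        ih t1 ht (by simpa using hl)]
      simp [pvP, ha]

-- the loop of B computes the filtered scan over the remaining suffixes
theorem go_spec (w0 w1 : String) (n : Nat)
    (h0 : w0.toList.length = n) (h1 : w1.toList.length = n) :
    ∀ (fuel : Nat) (i : Nat), n + 1 ≤ fuel + i →
      checkAltGo fuel w0 w1 (n : Int) (i : Int)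
        = ((w0.toList.drop i).zip (w1.toList.drop i)).all pvP := by
  intro fuel
  induction fuel with
  | zero =>
    intro i hi
    have hd0 : w0.toList.drop i = [] := List.drop_eq_nil_of_le (by omega)
    simp [checkAltGo, hd0]
  | succ fuel ih =>
    intro i hi
    by_cases hin : i < n
    · have hlt : (i : Int) < (n : Int) := by exact_mod_cast hin
      have hile : i ≤ w0.toList.length := by omega
      have hF : PySem.Str.findFrom w0 "*" (i : Int)
          = PySem.Chars.findFrom w0.toList ['*'] (i : Int) := by
        rw [PySem.Str.findFrom_eq]; rfl
      by_cases hneg : PySem.Chars.findFrom w0.toList ['*'] (i : Int) = -1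
      · -- no star in the suffix: one final chunk up to n
        have hnostar : '*' ∉ w0.toList.drop i := by
          intro hm
          obtain ⟨s, t, hst⟩ := List.mem_iff_append.mp hm
          exact (PySem.Chars.findFrom_natCast_eq_neg_one_iff w0.toList ['*'] i hile).mp hneg
            ⟨s, t, by rw [hst]; simp⟩
        have hsl0 : (PySem.Str.slice w0 (some (i : Int)) (some (n : Int))).toList
            = w0.toList.drop i := by
          rw [PySem.Str.toList_slice, PySem.Chars.slice_eq_listSlice,
            PySem.List.slice_natCast]
          exact List.take_of_length_le (by simp [h0])
        have hsl1 : (PySem.Str.slice w1 (some (i : Int)) (some (n : Int))).toList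
            = w1.toList.drop i := by
          rw [PySem.Str.toList_slice, PySem.Chars.slice_eq_listSlice,
            PySem.List.slice_natCast]
          exact List.take_of_length_le (by simp [h1])
        have hlen : (w0.toList.drop i).length = (w1.toList.drop i).length := by
          simp [h0, h1]
        simp only [checkAltGo, if_pos hlt, hF, if_pos hneg]
        rw [noStar_all _ _ hnostar hlen]
        by_cases heq : PySem.Str.slice w1 (some (i : Int)) (some (n : Int))
            = PySem.Str.slice w0 (some (i : Int)) (some (n : Int))
        · rw [if_neg (not_not_intro heq)]
          have hLeq : w1.toList.drop i = w0.toList.drop i := by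
            rw [← hsl0, ← hsl1, heq]
          have hc : ((n : Int) + 1) = (((n + 1 : Nat)) : Int) := by push_cast; ring
          rw [hc, ih (n + 1) (by omega), hLeq]
          have hd : w0.toList.drop (n + 1) = [] := List.drop_eq_nil_of_le (by omega)
          simp [hd]
        · rw [if_pos heq]
          have hne : (w0.toList.drop i == w1.toList.drop i) = false := by
            simp only [beq_eq_false_iff_ne, ne_eq]
            intro hh
            exact heq (String.toList_inj.mp (by rw [hsl0, hsl1, hh]))
          rw [hne]
      · -- a star at position j: compare the chunk [i:j], skip j, continue at j + 1
        obtain ⟨hiF, hpref, hmin⟩ :=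
          PySem.Chars.findFrom_natCast_spec w0.toList ['*'] i hile hneg
        have hF0 : (0 : Int) ≤ PySem.Chars.findFrom w0.toList ['*'] (i : Int) :=
          le_trans (Int.natCast_nonneg i) hiF
        have hFj : PySem.Chars.findFrom w0.toList ['*'] (i : Int)
            = ((PySem.Chars.findFrom w0.toList ['*'] (i : Int)).toNat : Int) :=
          (Int.toNat_of_nonneg hF0).symm
        generalize hjdef : (PySem.Chars.findFrom w0.toList ['*'] (i : Int)).toNat = j at *
        have hij : i ≤ j := by omega
        have hj0 : w0.toList[j]? = some '*' := by
          have := (singleton_prefix '*' _).mp hpref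
          simpa [List.getElem?_drop] using this
        obtain ⟨hjlt, hjval⟩ := List.getElem?_eq_some_iff.mp hj0
        have hjn : j < n := by omega
        have hns : ∀ k, i ≤ k → k < j → w0.toList[k]? ≠ some '*' := by
          intro k hk1 hk2 hk3
          exact hmin k hk1 hk2 ((singleton_prefix '*' _).mpr
            (by simpa [List.getElem?_drop] using hk3))
        have hnostar : '*' ∉ (w0.toList.drop i).take (j - i) := by
          intro hm
          obtain ⟨t, hts⟩ := List.mem_iff_getElem?.mp hm
          have htlt : t < j - i := by
            by_contra hge
            rw [List.getElem?_take_eq_none (by omega)] at hts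
            simp at hts
          have hval : w0.toList[i + t]? = some '*' := by
            simpa [List.getElem?_take, htlt, List.getElem?_drop] using hts
          exact hns (i + t) (by omega) (by omega) hval
        have hclen0 : ((w0.toList.drop i).take (j - i)).length = j - i := by
          simp [h0]; omega
        have hclen1 : ((w1.toList.drop i).take (j - i)).length = j - i := by
          simp [h1]; omega
        have hdec0 : w0.toList.drop i
            = (w0.toList.drop i).take (j - i) ++ w0.toList.drop j := by
          conv_lhs => rw [← List.take_append_drop (j - i) (w0.toList.drop i)]
          rw [List.drop_drop, show i + (j - i) = j by omega]
        have hdec1 : w1.toList.drop i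
            = (w1.toList.drop i).take (j - i) ++ w1.toList.drop j := by
          conv_lhs => rw [← List.take_append_drop (j - i) (w1.toList.drop i)]
          rw [List.drop_drop, show i + (j - i) = j by omega]
        have hjlt1 : j < w1.toList.length := by omega
        have hm0 : w0.toList.drop j = '*' :: w0.toList.drop (j + 1) := by
          rw [List.drop_eq_getElem_cons hjlt, hjval]
        have hm1 : w1.toList.drop j = w1.toList[j] :: w1.toList.drop (j + 1) :=
          List.drop_eq_getElem_cons hjlt1
        have hsl0 : (PySem.Str.slice w0 (some (i : Int)) (some (j : Int))).toList
            = (w0.toList.drop i).take (j - i) := by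
          rw [PySem.Str.toList_slice, PySem.Chars.slice_eq_listSlice,
            PySem.List.slice_natCast]
        have hsl1 : (PySem.Str.slice w1 (some (i : Int)) (some (j : Int))).toList
            = (w1.toList.drop i).take (j - i) := by
          rw [PySem.Str.toList_slice, PySem.Chars.slice_eq_listSlice,
            PySem.List.slice_natCast]
        conv_rhs => rw [hdec0, hdec1,
          List.zip_append (by rw [hclen0, hclen1]), List.all_append, hm0, hm1,
          List.zip_cons_cons, List.all_cons]
        rw [noStar_all _ _ hnostar (by rw [hclen0, hclen1])]
        have hpstar : pvP ('*', w1.toList[j]) = true := by simp [pvP]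
        rw [hpstar, Bool.true_and]
        have hjne : ((j : Int)) ≠ -1 := by omega
        simp only [checkAltGo, if_pos hlt, hF, hFj, if_neg hjne]
        by_cases heq : PySem.Str.slice w1 (some (i : Int)) (some (j : Int))
            = PySem.Str.slice w0 (some (i : Int)) (some (j : Int))
        · rw [if_neg (not_not_intro heq)]
          have hceq : ((w0.toList.drop i).take (j - i)
              == (w1.toList.drop i).take (j - i)) = true := by
            simp only [beq_iff_eq]
            rw [← hsl0, ← hsl1, heq]
          have hc : ((j : Int) + 1) = (((j + 1 : Nat)) : Int) := by push_cast; ring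
          rw [hc, ih (j + 1) (by omega), hceq, Bool.true_and]
        · rw [if_pos heq]
          have hcne : ((w0.toList.drop i).take (j - i)
              == (w1.toList.drop i).take (j - i)) = false := by
            simp only [beq_eq_false_iff_ne, ne_eq]
            intro hh
            exact heq (String.toList_inj.mp (by rw [hsl0, hsl1, hh]))
          rw [hcne, Bool.false_and]
    · have hd0 : w0.toList.drop i = [] := List.drop_eq_nil_of_le (by omega)
      have hnlt : ¬ (i : Int) < (n : Int) := by exact_mod_cast hin
      simp [checkAltGo, hnlt, hd0]

theorem check_eq_alt (word0 word1 : String) : check word0 word1 = check_alt word0 word1 := by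
  rw [check_eq_zipAll]
  simp only [check_alt]
  by_cases hlen : PySem.Str.len word0 = PySem.Str.len word1
  · rw [if_neg (not_not_intro hlen)]
    have hl : word1.toList.length = word0.toList.length := by
      have h0 := PySem.Str.len_eq word0
      have h1 := PySem.Str.len_eq word1
      omega
    have hn : PySem.Str.len word0 = ((word0.toList.length : Nat) : Int) := by
      have := PySem.Str.len_eq word0; omega
    have hgo := go_spec word0 word1 word0.toList.length rfl hl
      (word0.toList.length + 1) 0 (by omega)
    simp only [Nat.cast_zero, List.drop_zero] at hgo
    rw [hn, hgo]
    rw [show ((word0.toList.length : Int) == PySem.Str.len word1) = true by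
      rw [← hn]; simp only [hlen, beq_self_eq_true]]
    rw [Bool.true_and]
  · rw [if_pos hlen]
    rw [show (PySem.Str.len word0 == PySem.Str.len word1) = false by
      simp only [beq_eq_false_iff_ne, ne_eq]; exact hlen]
    rw [Bool.false_and]

-- ===== VERDICT (by name: the statement is the Claim_ definition above) =====
theorem check_spec : Claim_equal_check := by
  intro word0 word1 _
  exact check_eq_alt word0 word1
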